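-- pv_equiv track=rewrite | github.com/genfitapp/genfitapp-backend | backend/app/stats/utils.py | get_muscle_group
-- ===== SOURCE A (Python) =====
-- MUSCLE_GROUP_MAP = {
--     "Legs": {
--         "quads", "quadriceps", "glutes", "hamstrings", "calves",
--         "adductors", "abductors", "legs"
--     },
--     "Arms": {
--         "biceps", "triceps", "forearms", "arms"
--     },
--     "Back": {
--         "lats", "traps", "trapezius", "lower back", "back",
--         'lower-back', 'upper-back'
--     },
--     "Chest": {
--         "pectorals", "pecs", "chest"
--     },
--     "Shoulders": {
--         "delts", "deltoids", "rear delts", "shoulders", "front delts", "side delts"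
--     },
--     "Core": {
--         "abs", "abdominals", "obliques", "core"
--     },
-- }
--
-- def get_muscle_group(muscle: str) -> str:
--     if not muscle:
--         return "Other"
--     m = muscle.strip().lower()
--     for group, aliases in MUSCLE_GROUP_MAP.items():
--         if m in aliases:
--             return group
--     return "Other"
-- ===== SOURCE B (Python) =====
-- # Idiomatic rewrite: a single flat alias->group lookup table replaces the scan over groups.
-- _REVERSE = {
--     "quads": "Legs", "quadriceps": "Legs", "glutes": "Legs", "hamstrings": "Legs",
--     "calves": "Legs", "adductors": "Legs", "abductors": "Legs", "legs": "Legs",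
--     "biceps": "Arms", "triceps": "Arms", "forearms": "Arms", "arms": "Arms",
--     "lats": "Back", "traps": "Back", "trapezius": "Back", "lower back": "Back",
--     "back": "Back", "lower-back": "Back", "upper-back": "Back",
--     "pectorals": "Chest", "pecs": "Chest", "chest": "Chest",
--     "delts": "Shoulders", "deltoids": "Shoulders", "rear delts": "Shoulders",
--     "shoulders": "Shoulders", "front delts": "Shoulders", "side delts": "Shoulders",
--     "abs": "Core", "abdominals": "Core", "obliques": "Core", "core": "Core",
-- }
--
-- def get_muscle_group(muscle: str) -> str:
--     if not muscle:
--         return "Other"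
--     return _REVERSE.get(muscle.strip().lower(), "Other")
-- ===== Notes on version B (the rewrite author's own statement) =====
-- stated objective: idiomatic
-- what changed: Replaces the loop over the six (group, alias-set) pairs with a single flat alias-to-group dictionary and a single .get lookup with the same fallback string.
import Mathlib
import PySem

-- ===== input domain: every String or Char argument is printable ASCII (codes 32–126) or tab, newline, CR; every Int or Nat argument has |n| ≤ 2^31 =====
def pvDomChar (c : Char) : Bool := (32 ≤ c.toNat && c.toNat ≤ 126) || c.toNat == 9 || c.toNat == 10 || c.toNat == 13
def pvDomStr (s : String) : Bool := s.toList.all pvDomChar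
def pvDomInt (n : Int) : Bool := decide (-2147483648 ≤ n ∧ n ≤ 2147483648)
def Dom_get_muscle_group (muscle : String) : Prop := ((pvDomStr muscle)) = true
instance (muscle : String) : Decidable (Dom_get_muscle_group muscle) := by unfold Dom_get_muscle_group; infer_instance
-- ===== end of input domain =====

-- B replaces A's scan over the six muscle groups with one lookup in a flat alias→group table (idiomatic; return value only).

-- ===== PORT A =====
def pvMuscleGroupMap : List (String × PySem.Set String) :=
  [ ("Legs", PySem.Set.ofList ["quads", "quadriceps", "glutes", "hamstrings", "calves",
      "adductors", "abductors", "legs"]),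
    ("Arms", PySem.Set.ofList ["biceps", "triceps", "forearms", "arms"]),
    ("Back", PySem.Set.ofList ["lats", "traps", "trapezius", "lower back", "back",
      "lower-back", "upper-back"]),
    ("Chest", PySem.Set.ofList ["pectorals", "pecs", "chest"]),
    ("Shoulders", PySem.Set.ofList ["delts", "deltoids", "rear delts", "shoulders",
      "front delts", "side delts"]),
    ("Core", PySem.Set.ofList ["abs", "abdominals", "obliques", "core"]) ]

def pvLoopA (m : String) : List (String × PySem.Set String) → String
  | [] => "Other"
  | (group, aliases) :: rest =>
      if PySem.Set.contains aliases m then group else pvLoopA m rest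

def get_muscle_group (muscle : String) : String :=
  if muscle == "" then "Other"
  else pvLoopA (PySem.Str.lower (PySem.Str.strip muscle)) pvMuscleGroupMap

-- ===== PORT B =====
def pvReverse : PySem.Dict String String :=
  PySem.Dict.ofList
    [ ("quads", "Legs"), ("quadriceps", "Legs"), ("glutes", "Legs"), ("hamstrings", "Legs"),
      ("calves", "Legs"), ("adductors", "Legs"), ("abductors", "Legs"), ("legs", "Legs"),
      ("biceps", "Arms"), ("triceps", "Arms"), ("forearms", "Arms"), ("arms", "Arms"),
      ("lats", "Back"), ("traps", "Back"), ("trapezius", "Back"), ("lower back", "Back"),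
      ("back", "Back"), ("lower-back", "Back"), ("upper-back", "Back"),
      ("pectorals", "Chest"), ("pecs", "Chest"), ("chest", "Chest"),
      ("delts", "Shoulders"), ("deltoids", "Shoulders"), ("rear delts", "Shoulders"),
      ("shoulders", "Shoulders"), ("front delts", "Shoulders"), ("side delts", "Shoulders"),
      ("abs", "Core"), ("abdominals", "Core"), ("obliques", "Core"), ("core", "Core") ]

def get_muscle_group_alt (muscle : String) : String :=
  if muscle == "" then "Other"
  else PySem.Dict.getD pvReverse (PySem.Str.lower (PySem.Str.strip muscle)) "Other"

-- ===== PRECONDITION & SPEC =====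
def Spec_get_muscle_group (muscle : String) (out : String) : Prop := out = get_muscle_group_alt muscle
instance (muscle : String) (out : String) : Decidable (Spec_get_muscle_group muscle out) := by unfold Spec_get_muscle_group; infer_instance

-- ===== CLAIM (what is proved, stated in full; the proofs are below) =====
def Claim_equal_get_muscle_group : Prop := ∀ (muscle : String), Dom_get_muscle_group muscle → Spec_get_muscle_group muscle (get_muscle_group muscle)

-- ===== LEMMAS AND PROOFS =====
def pvAliases : List String :=
  ["quads", "quadriceps", "glutes", "hamstrings", "calves", "adductors", "abductors", "legs",
   "biceps", "triceps", "forearms", "arms",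
   "lats", "traps", "trapezius", "lower back", "back", "lower-back", "upper-back",
   "pectorals", "pecs", "chest",
   "delts", "deltoids", "rear delts", "shoulders", "front delts", "side delts",
   "abs", "abdominals", "obliques", "core"]

theorem pvLoop_eq_lookup (m : String) :
    pvLoopA m pvMuscleGroupMap = PySem.Dict.getD pvReverse m "Other" := by
  by_cases hm : m ∈ pvAliases
  · fin_cases hm <;> rfl
  · simp [pvAliases] at hm
    obtain ⟨h1,h2,h3,h4,h5,h6,h7,h8,h9,h10,h11,h12,h13,h14,h15,h16,h17,h18,h19,h20,
      h21,h22,h23,h24,h25,h26,h27,h28,h29,h30,h31,h32⟩ := hm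
    rw [show pvReverse = PySem.Dict.mk
      [ ("quads", "Legs"), ("quadriceps", "Legs"), ("glutes", "Legs"), ("hamstrings", "Legs"),
        ("calves", "Legs"), ("adductors", "Legs"), ("abductors", "Legs"), ("legs", "Legs"),
        ("biceps", "Arms"), ("triceps", "Arms"), ("forearms", "Arms"), ("arms", "Arms"),
        ("lats", "Back"), ("traps", "Back"), ("trapezius", "Back"), ("lower back", "Back"),
        ("back", "Back"), ("lower-back", "Back"), ("upper-back", "Back"),
        ("pectorals", "Chest"), ("pecs", "Chest"), ("chest", "Chest"),
        ("delts", "Shoulders"), ("deltoids", "Shoulders"), ("rear delts", "Shoulders"),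
        ("shoulders", "Shoulders"), ("front delts", "Shoulders"), ("side delts", "Shoulders"),
        ("abs", "Core"), ("abdominals", "Core"), ("obliques", "Core"), ("core", "Core") ]
      by decide]
    simp [pvLoopA, pvMuscleGroupMap, PySem.Dict.getD, PySem.Dict.get?,
      PySem.Set.contains, PySem.Set.ofList, PySem.Set.add,
      h1,h2,h3,h4,h5,h6,h7,h8,h9,h10,h11,h12,h13,h14,h15,h16,h17,h18,h19,h20,h21,h22,h23,h24,h25,h26,h27,h28,h29,h30,h31,h32,
      Ne.symm h1,Ne.symm h2,Ne.symm h3,Ne.symm h4,Ne.symm h5,Ne.symm h6,Ne.symm h7,Ne.symm h8,Ne.symm h9,Ne.symm h10,Ne.symm h11,Ne.symm h12,Ne.symm h13,Ne.symm h14,Ne.symm h15,Ne.symm h16,Ne.symm h17,Ne.symm h18,Ne.symm h19,Ne.symm h20,Ne.symm h21,Ne.symm h22,Ne.symm h23,Ne.symm h24,Ne.symm h25,Ne.symm h26,Ne.symm h27,Ne.symm h28,Ne.symm h29,Ne.symm h30,Ne.symm h31,Ne.symm h32]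

-- ===== VERDICT (by name: the statement is the Claim_ definition above) =====
theorem get_muscle_group_spec : Claim_equal_get_muscle_group := by
  intro muscle _
  unfold Spec_get_muscle_group get_muscle_group get_muscle_group_alt
  by_cases h : muscle == ""
  · simp [h]
  · simp [h, pvLoop_eq_lookup]
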